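-- pv_equiv track=rewrite | github.com/harvard-edge/cs249r_book | tools/scripts/content/format_grid_tables.py | _merge_multiline_cells
-- ===== SOURCE A (Python) =====
-- from typing import List, Tuple, Dict, Optional
--
-- def _merge_multiline_cells(content_lines: List[str]) -> List[str]:
--     """Merge multi-line cell content into a single row."""
--     if not content_lines:
--         return []
--
--     # Parse first line to get the number of columns
--     first_line_cells = [cell.strip() for cell in content_lines[0][1:-1].split('|')]
--     merged_cells = first_line_cells[:]
--
--     # Merge content from subsequent lines
--     for line in content_lines[1:]:
--         line_cells = [cell.strip() for cell in line[1:-1].split('|')]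
--         for j, cell_content in enumerate(line_cells):
--             if j < len(merged_cells) and cell_content:
--                 if merged_cells[j]:
--                     merged_cells[j] += ' ' + cell_content
--                 else:
--                     merged_cells[j] = cell_content
--
--     return merged_cells
-- ===== SOURCE B (Python) =====
-- from typing import List
--
-- def _merge_multiline_cells(content_lines: List[str]) -> List[str]:
--     """Merge multi-line cell content into a single row (column-major gather-then-join)."""
--     if not content_lines:
--         return []
--     rows = [[c.strip() for c in line[1:-1].split('|')] for line in content_lines]
--     num_cols = len(rows[0])
--     return [' '.join(p for p in (row[j] for row in rows if j < len(row)) if p)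
--             for j in range(num_cols)]
-- ===== Notes on version B (the rewrite author's own statement) =====
-- stated objective: faster
-- what changed: Row-major in-place accumulation with repeated string concatenation is replaced by a column-major transpose: parse all lines once, then for each column gather its in-range pieces and build the cell with a single ' '.join of the non-empty ones.
import Mathlib
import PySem

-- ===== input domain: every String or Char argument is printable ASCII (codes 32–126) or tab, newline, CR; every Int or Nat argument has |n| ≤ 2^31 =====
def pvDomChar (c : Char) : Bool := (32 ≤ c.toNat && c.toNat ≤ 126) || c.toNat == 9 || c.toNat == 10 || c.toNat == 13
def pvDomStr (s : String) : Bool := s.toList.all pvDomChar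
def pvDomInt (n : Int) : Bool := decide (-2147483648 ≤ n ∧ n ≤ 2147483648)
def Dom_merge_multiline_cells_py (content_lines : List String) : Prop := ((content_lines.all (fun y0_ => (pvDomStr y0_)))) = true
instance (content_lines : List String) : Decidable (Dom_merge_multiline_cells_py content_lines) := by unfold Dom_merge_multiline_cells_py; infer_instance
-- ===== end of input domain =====

-- B replaces A's row-major accumulation via repeated string concatenation by a column-major gather plus one ' '.join per column (measured faster on the generated inputs).

-- shared cell parsing, [cell.strip() for cell in line[1:-1].split('|')] (both Pythons contain this expression verbatim)
def pvCells (line : String) : List String :=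
  (PySem.Chars.splitOn (PySem.Str.slice line (some 1) (some (-1))).toList ['|']).map
    (fun cs => String.ofList (PySem.Chars.strip cs))

-- ===== PORT A =====
-- A's inner loop: for j, cell_content in enumerate(line_cells): …
def pvMergeLine (merged : List String) (cells : List String) (j : Nat) : List String :=
  match cells with
  | [] => merged
  | c :: cs =>
      pvMergeLine
        (if j < merged.length ∧ c ≠ "" then
           (if merged.getD j "" ≠ "" then merged.set j (merged.getD j "" ++ " " ++ c)
            else merged.set j c)
         else merged)
        cs (j + 1)

def merge_multiline_cells_py (content_lines : List String) : List String :=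
  match content_lines with
  | [] => []
  | first :: rest =>
      rest.foldl (fun merged line => pvMergeLine merged (pvCells line) 0) (pvCells first)

-- ===== PORT B =====
def merge_multiline_cells_py_alt (content_lines : List String) : List String :=
  match content_lines with
  | [] => []
  | _ :: _ =>
      let rows := content_lines.map pvCells
      (List.range (rows.headD []).length).map (fun j =>
        PySem.Str.join " " ((rows.filterMap (fun row => row[j]?)).filter (fun p => p ≠ "")))

-- ===== PRECONDITION & SPEC =====
def Spec_merge_multiline_cells_py (content_lines : List String) (out : List String) : Prop := out = merge_multiline_cells_py_alt content_lines
instance (content_lines : List String) (out : List String) : Decidable (Spec_merge_multiline_cells_py content_lines out) := by unfold Spec_merge_multiline_cells_py; infer_instance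

-- ===== CLAIM (what is proved, stated in full; the proofs are below) =====
def Claim_equal_merge_multiline_cells_py : Prop := ∀ (content_lines : List String), Dom_merge_multiline_cells_py content_lines → Spec_merge_multiline_cells_py content_lines (merge_multiline_cells_py content_lines)

-- ===== LEMMAS AND PROOFS =====

-- the effect of merging one later cell c into an accumulated cell value a
def pvStep (a c : String) : String := if c ≠ "" then (if a ≠ "" then a ++ " " ++ c else c) else a

lemma pv_join_nil : PySem.Str.join " " [] = "" := by
  apply String.toList_injective
  rw [PySem.Str.toList_join]
  simp [PySem.Chars.join_nil]

lemma pv_join_singleton (p : String) : PySem.Str.join " " [p] = p := by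
  apply String.toList_injective
  rw [PySem.Str.toList_join]
  simp [PySem.Chars.join_singleton]

lemma pv_join_cons_cons (p q : String) (rest : List String) :
    PySem.Str.join " " (p :: q :: rest) = p ++ " " ++ PySem.Str.join " " (q :: rest) := by
  apply String.toList_injective
  rw [PySem.Str.toList_join]
  simp [PySem.Chars.join_cons_cons, PySem.Str.toList_join]

lemma pv_append_ne_empty (x c : String) : x ++ " " ++ c ≠ "" := by
  intro h
  have : (x ++ " " ++ c).toList = [] := by rw [h]; rfl
  simp at this

-- A's left-to-right accumulation of a column is B's space-join of its non-empty pieces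
lemma pv_foldl_step_eq_join (ps : List String) (x : String) :
    ps.foldl pvStep x = PySem.Str.join " " ((x :: ps).filter (fun p => p ≠ "")) := by
  induction ps generalizing x with
  | nil =>
      by_cases hx : x = ""
      · simp [hx, pv_join_nil]
      · simp [hx, pv_join_singleton]
  | cons c cs ih =>
      rw [List.foldl_cons, ih]
      by_cases hc : c = ""
      · simp only [pvStep, hc, ne_eq, not_true_eq_false, if_false]
        congr 1
      by_cases hx : x = ""
      · simp [pvStep, hc, hx]
      · have hstep : pvStep x c = x ++ " " ++ c := by simp [pvStep, hc, hx]
        rw [hstep]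
        simp only [List.filter_cons, hc, hx, pv_append_ne_empty x c, decide_true,
          ne_eq, not_false_eq_true, if_true]
        cases h : cs.filter (fun p => decide (p ≠ "")) with
        | nil => rw [pv_join_singleton, pv_join_cons_cons, pv_join_singleton]
        | cons d l' =>
            rw [pv_join_cons_cons, pv_join_cons_cons, pv_join_cons_cons]
            apply String.toList_injective
            simp

-- pointwise effect of A's inner (enumerate) loop on the merged list
lemma pvMergeLine_getElem? (cells : List String) (m : List String) (j i : Nat) :
    (pvMergeLine m cells j)[i]? =
      if j ≤ i ∧ i - j < cells.length then
        m[i]?.map (fun a => pvStep a (cells.getD (i - j) ""))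
      else m[i]? := by
  induction cells generalizing m j with
  | nil => simp [pvMergeLine]
  | cons c cs ih =>
      rw [pvMergeLine, ih]
      set m' := (if j < m.length ∧ c ≠ "" then
           (if m.getD j "" ≠ "" then m.set j (m.getD j "" ++ " " ++ c)
            else m.set j c)
         else m) with hm'def
      have hm' : m'[i]? = if i = j then m[i]?.map (fun a => pvStep a c) else m[i]? := by
        by_cases hij : i = j
        · subst hij
          simp only [if_true]
          rw [hm'def]
          by_cases hlt : i < m.length
          · by_cases hc : c = ""
            · simp [hc, pvStep]
            · have hget : m[i]? = some m[i] := List.getElem?_eq_getElem hlt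
              have hgd : m.getD i "" = m[i] := by simp [List.getD, hlt]
              by_cases hne : m[i] = ""
              · simp [hlt, hc, hne, pvStep]
              · simp [hlt, hc, hne, pvStep]
          · have hget : m[i]? = none := by simp; omega
            split_ifs <;> simp [hget, List.getElem?_set_self']
        · rw [if_neg hij, hm'def]
          split_ifs <;> simp [List.getElem?_set_ne (by omega : j ≠ i)]
      rw [hm']
      by_cases hij : i = j
      · subst hij
        simp
      · rw [if_neg hij]
        by_cases hcond : j ≤ i ∧ i - j < cs.length + 1
        · have h1 : j + 1 ≤ i ∧ i - (j + 1) < cs.length := by omega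
          rw [if_pos h1, if_pos (by simpa using hcond)]
          have : i - j = (i - (j + 1)) + 1 := by omega
          rw [this]
          simp [List.getD]
        · have h1 : ¬ (j + 1 ≤ i ∧ i - (j + 1) < cs.length) := by omega
          rw [if_neg h1, if_neg (by simpa using hcond)]

-- pointwise effect of A's outer loop: each column folds pvStep over its in-range pieces
lemma foldl_mergeLine_getElem? (lines : List String) (m : List String) (i : Nat) :
    (lines.foldl (fun merged line => pvMergeLine merged (pvCells line) 0) m)[i]? =
      m[i]?.map (fun a => (lines.filterMap (fun l => (pvCells l)[i]?)).foldl pvStep a) := by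
  induction lines generalizing m with
  | nil => simp
  | cons l ls ih =>
      rw [List.foldl_cons, ih, pvMergeLine_getElem?, List.filterMap_cons]
      by_cases h : i < (pvCells l).length
      · have hsome : (pvCells l)[i]? = some (pvCells l)[i] := List.getElem?_eq_getElem h
        have hgd : (pvCells l).getD i "" = (pvCells l)[i] := by simp [List.getD, h]
        rw [if_pos ⟨Nat.zero_le i, by simpa using h⟩, hsome]
        simp [hsome, Option.map_map, Function.comp_def]
      · have hnone : (pvCells l)[i]? = none := by simp; omega
        rw [if_neg (by simpa using h), hnone]

-- ===== VERDICT (by name: the statement is the Claim_ definition above) =====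
theorem merge_multiline_cells_py_spec : Claim_equal_merge_multiline_cells_py := by
  intro content_lines _
  show merge_multiline_cells_py content_lines = merge_multiline_cells_py_alt content_lines
  cases content_lines with
  | nil => rfl
  | cons first rest =>
      simp only [merge_multiline_cells_py, merge_multiline_cells_py_alt, List.map_cons,
        List.headD_cons]
      apply List.ext_getElem?
      intro i
      rw [foldl_mergeLine_getElem?]
      by_cases h : i < (pvCells first).length
      · rw [List.getElem?_eq_getElem h]
        simp only [List.getElem?_map, List.getElem?_range, h, Option.map_some,
          List.filterMap_map, Function.comp_def, List.filterMap_cons,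
          List.getElem?_eq_getElem h]
        rw [pv_foldl_step_eq_join]
      · have h1 : (pvCells first)[i]? = none := by simp; omega
        have h2 : ¬ i < (List.range (pvCells first).length).length := by simpa using h
        rw [h1, List.getElem?_eq_none_iff.mpr (by simpa using h2)]
        rfl
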